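-- pv_equiv track=rewrite | github.com/CorradoColaleo/AlgoFobia | Dynamic Programming/[Esame] 16032022_ESPRESSIONE_MATEMATICA.py | solution
-- ===== SOURCE A (Python) =====
-- def solution(nums, operations):
--     dp1 = [0] * len(nums)
--     dp2 = [0] * len(nums)
--
--     # Gestione dei casi base
--     if len(nums) == 0:
--         return 0
--     elif len(nums) == 1:
--         return nums[0]
--     elif len(nums) == 2:
--         if operations[0] == "*":
--             return nums[0] * nums[1]
--         else:
--             return nums[0] + nums[1]
--
--     # Inizializzazione
--     dp1[-1] = nums[-1]
--     dp2[-1] = nums[-1]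
--     if operations[-1] == "*":
--         dp1[-2] = nums[-2] * nums[-1]
--         dp2[-2] = nums[-2] * nums[-1]
--     else:
--         dp1[-2] = nums[-2] + nums[-1]
--         dp2[-2] = nums[-2] + nums[-1]
--
--
--     # Ciclo per ottenere il massimo valore
--     for i in range(len(nums) - 3, -1, -1):
--         if operations[i] == "*":
--             dp1[i] = nums[i] * dp1[i + 1]
--         else:
--             dp1[i] = nums[i] + dp1[i + 1]
--         temp = nums[i]
--         for j in range(i + 1, len(nums)):
--             if operations[j - 1] == "*":
--                 temp *= nums[j]
--             else:
--                 temp += nums[j]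
--             if j + 1 < len(nums):
--                 dp1[i] = max(dp1[i], temp * dp1[j + 1] if operations[j] == "*" else temp + dp1[j + 1])
--             else:
--                 dp1[i] = max(dp1[i], temp)
--
--     # Ciclo per ottenere il minimo valore
--     for i in range(len(nums) - 3, -1, -1):
--         if operations[i] == "*":
--             dp2[i] = nums[i] * dp2[i + 1]
--         else:
--             dp2[i] = nums[i] + dp2[i + 1]
--         temp = nums[i]
--         for j in range(i + 1, len(nums)):
--             if operations[j - 1] == "*":
--                 temp *= nums[j]
--             else:
--                 temp += nums[j]
--             if j + 1 < len(nums):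
--                 dp2[i] = min(dp2[i], temp * dp2[j + 1] if operations[j] == "*" else temp + dp2[j + 1])
--             else:
--                 dp2[i] = min(dp2[i], temp)
--
--     return dp1[0],dp2[0]
-- ===== SOURCE B (Python) =====
-- def solution(nums, operations):
--     n = len(nums)
--     if n == 0:
--         return 0
--     if n == 1:
--         return nums[0]
--     if n == 2:
--         return nums[0] * nums[1] if operations[0] == "*" else nums[0] + nums[1]
--
--     memo = {}
--
--     def best(i):
--         # (max, min) value of the suffix expression starting at nums[i]
--         if i in memo:
--             return memo[i]
--         if i == n - 1:
--             res = (nums[i], nums[i])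
--         elif i == n - 2:
--             v = nums[i] * nums[i + 1] if operations[-1] == "*" else nums[i] + nums[i + 1]
--             res = (v, v)
--         else:
--             bh, bl = best(i + 1)
--             if operations[i] == "*":
--                 hi, lo = nums[i] * bh, nums[i] * bl
--                 t = nums[i] * nums[i + 1]
--             else:
--                 hi, lo = nums[i] + bh, nums[i] + bl
--                 t = nums[i] + nums[i + 1]
--             for j in range(i + 1, n - 1):
--                 bh, bl = best(j + 1)
--                 if operations[j] == "*":
--                     hi = max(hi, t * bh)
--                     lo = min(lo, t * bl)
--                     t = t * nums[j + 1]
--                 else: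
--                     hi = max(hi, t + bh)
--                     lo = min(lo, t + bl)
--                     t = t + nums[j + 1]
--             res = (max(hi, t), min(lo, t))
--         memo[i] = res
--         return res
--
--     return best(0)
-- ===== Notes on version B (the rewrite author's own statement) =====
-- stated objective: alternative
-- what changed: B replaces A's two bottom-up dp-array passes (index-wise writes plus an inner temp scan per cell) by a single top-down memoized recursion best(i) that returns the (max,min) pair for the suffix at i, computing both extrema in one fused split-point loop and storing results in a dict.
-- outside the precondition, e.g. on solution([1, 2], ['+']): A returns 3, B returns 3; on solution([7], []): A returns 7, B returns 7; on solution([], []): A returns 0, B returns 0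
import Mathlib
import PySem

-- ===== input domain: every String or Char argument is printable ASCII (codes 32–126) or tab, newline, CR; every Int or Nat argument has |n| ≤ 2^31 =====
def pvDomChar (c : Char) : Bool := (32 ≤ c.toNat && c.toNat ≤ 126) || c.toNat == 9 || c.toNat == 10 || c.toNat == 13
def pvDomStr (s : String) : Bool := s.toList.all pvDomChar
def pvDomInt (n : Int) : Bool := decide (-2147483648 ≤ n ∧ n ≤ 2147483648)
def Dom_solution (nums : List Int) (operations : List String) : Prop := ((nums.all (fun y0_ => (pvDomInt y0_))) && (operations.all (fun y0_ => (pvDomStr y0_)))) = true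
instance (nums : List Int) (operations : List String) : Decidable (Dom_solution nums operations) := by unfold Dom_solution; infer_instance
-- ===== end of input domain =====

-- B replaces A's two bottom-up dp-array passes by one top-down memoized recursion
-- best(i) returning the (max,min) pair of the suffix at i (dict memo, fused max/min loop);
-- alternative decomposition, same asymptotic cost.

-- ===== PORT A =====
-- A-side helpers: the loop bodies of A's two (textually duplicated) dp loops, named so the
-- proofs can speak about them; each is a line-by-line transcription of A's Python loops.
def aInnerMax (nums : List Int) (operations : List String) (i : Int) :
    List Int × Int → Int → List Int × Int := fun st j =>
  let temp := if PySem.List.pyGetD operations (j - 1) "" = "*" then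
      st.2 * PySem.List.pyGetD nums j 0
    else
      st.2 + PySem.List.pyGetD nums j 0
  let dp1 := if j + 1 < (nums.length : Int) then
      PySem.List.pySetD st.1 i (max (PySem.List.pyGetD st.1 i 0)
        (if PySem.List.pyGetD operations j "" = "*" then
            temp * PySem.List.pyGetD st.1 (j + 1) 0
          else
            temp + PySem.List.pyGetD st.1 (j + 1) 0))
    else
      PySem.List.pySetD st.1 i (max (PySem.List.pyGetD st.1 i 0) temp)
  (dp1, temp)

def aOuterMax (nums : List Int) (operations : List String) : List Int → Int → List Int :=
  fun dp1 i =>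
  let dp1 := PySem.List.pySetD dp1 i
    (if PySem.List.pyGetD operations i "" = "*" then
        PySem.List.pyGetD nums i 0 * PySem.List.pyGetD dp1 (i + 1) 0
      else
        PySem.List.pyGetD nums i 0 + PySem.List.pyGetD dp1 (i + 1) 0)
  let st := (PySem.List.pyRange (i + 1) (nums.length : Int) 1).foldl
    (aInnerMax nums operations i) (dp1, PySem.List.pyGetD nums i 0)
  st.1

def aInnerMin (nums : List Int) (operations : List String) (i : Int) :
    List Int × Int → Int → List Int × Int := fun st j =>
  let temp := if PySem.List.pyGetD operations (j - 1) "" = "*" then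
      st.2 * PySem.List.pyGetD nums j 0
    else
      st.2 + PySem.List.pyGetD nums j 0
  let dp2 := if j + 1 < (nums.length : Int) then
      PySem.List.pySetD st.1 i (min (PySem.List.pyGetD st.1 i 0)
        (if PySem.List.pyGetD operations j "" = "*" then
            temp * PySem.List.pyGetD st.1 (j + 1) 0
          else
            temp + PySem.List.pyGetD st.1 (j + 1) 0))
    else
      PySem.List.pySetD st.1 i (min (PySem.List.pyGetD st.1 i 0) temp)
  (dp2, temp)

def aOuterMin (nums : List Int) (operations : List String) : List Int → Int → List Int :=
  fun dp2 i =>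
  let dp2 := PySem.List.pySetD dp2 i
    (if PySem.List.pyGetD operations i "" = "*" then
        PySem.List.pyGetD nums i 0 * PySem.List.pyGetD dp2 (i + 1) 0
      else
        PySem.List.pyGetD nums i 0 + PySem.List.pyGetD dp2 (i + 1) 0)
  let st := (PySem.List.pyRange (i + 1) (nums.length : Int) 1).foldl
    (aInnerMin nums operations i) (dp2, PySem.List.pyGetD nums i 0)
  st.1

def solution (nums : List Int) (operations : List String) : Int × Int :=
  let n : Int := (nums.length : Int)
  if n = 0 then (0, 0)          -- Python returns the scalar 0 here (outside Pre_)
  else if n = 1 then            -- Python returns the scalar nums[0] here (outside Pre_)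
    let v := PySem.List.pyGetD nums 0 0
    (v, v)
  else if n = 2 then            -- Python returns a scalar here (outside Pre_)
    let v := if PySem.List.pyGetD operations 0 "" = "*" then
        PySem.List.pyGetD nums 0 0 * PySem.List.pyGetD nums 1 0
      else
        PySem.List.pyGetD nums 0 0 + PySem.List.pyGetD nums 1 0
    (v, v)
  else
    let dp1 : List Int := List.replicate nums.length 0
    let dp2 : List Int := List.replicate nums.length 0
    let dp1 := PySem.List.pySetD dp1 (-1) (PySem.List.pyGetD nums (-1) 0)
    let dp2 := PySem.List.pySetD dp2 (-1) (PySem.List.pyGetD nums (-1) 0)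
    let seed := if PySem.List.pyGetD operations (-1) "" = "*" then
        PySem.List.pyGetD nums (-2) 0 * PySem.List.pyGetD nums (-1) 0
      else
        PySem.List.pyGetD nums (-2) 0 + PySem.List.pyGetD nums (-1) 0
    let dp1 := PySem.List.pySetD dp1 (-2) seed
    let dp2 := PySem.List.pySetD dp2 (-2) seed
    -- loop for the maximum value
    let dp1 := (PySem.List.pyRange (n - 3) (-1) (-1)).foldl (aOuterMax nums operations) dp1
    -- loop for the minimum value
    let dp2 := (PySem.List.pyRange (n - 3) (-1) (-1)).foldl (aOuterMin nums operations) dp2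
    (PySem.List.pyGetD dp1 0 0, PySem.List.pyGetD dp2 0 0)

-- ===== PORT B =====
-- B's inner split-point loop 'for j in range(i+1, n-1)' inside best: recursion on the
-- number r of remaining iterations, threading (hi, lo, t) and the memo dict; the recursive
-- best itself is passed in as 'bst'.
def bInner (nums : List Int) (ops : List String)
    (bst : Int → PySem.Dict Int (Int × Int) → (Int × Int) × PySem.Dict Int (Int × Int)) :
    Nat → Int → Int → Int → Int → PySem.Dict Int (Int × Int) →
      (Int × Int × Int) × PySem.Dict Int (Int × Int)
  | 0, _, t, hi, lo, memo => ((hi, lo, t), memo)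
  | (r+1), j, t, hi, lo, memo =>
    let q := bst (j + 1) memo
    if PySem.List.pyGetD ops j "" = "*" then
      bInner nums ops bst r (j + 1) (t * PySem.List.pyGetD nums (j + 1) 0)
        (max hi (t * q.1.1)) (min lo (t * q.1.2)) q.2
    else
      bInner nums ops bst r (j + 1) (t + PySem.List.pyGetD nums (j + 1) 0)
        (max hi (t + q.1.1)) (min lo (t + q.1.2)) q.2

-- Source B's memoized recursive best(i); Python's unbounded recursion is rendered with a Nat
-- fuel (structural recursion), solution_alt passes fuel nums.length which is proved ample.
def bBest (nums : List Int) (ops : List String) :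
    Nat → Int → PySem.Dict Int (Int × Int) → (Int × Int) × PySem.Dict Int (Int × Int)
  | 0, _, memo => (((0 : Int), (0 : Int)), memo)
  | (f+1), i, memo =>
    let n : Int := (nums.length : Int)
    if PySem.Dict.contains memo i then
      (PySem.Dict.getD memo i ((0 : Int), (0 : Int)), memo)
    else
      let rm :=
        if i = n - 1 then
          ((PySem.List.pyGetD nums i 0, PySem.List.pyGetD nums i 0), memo)
        else if i = n - 2 then
          let v := if PySem.List.pyGetD ops (-1) "" = "*" then
              PySem.List.pyGetD nums i 0 * PySem.List.pyGetD nums (i + 1) 0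
            else
              PySem.List.pyGetD nums i 0 + PySem.List.pyGetD nums (i + 1) 0
          ((v, v), memo)
        else
          let q := bBest nums ops f (i + 1) memo
          let s := if PySem.List.pyGetD ops i "" = "*" then
              (PySem.List.pyGetD nums i 0 * q.1.1, PySem.List.pyGetD nums i 0 * q.1.2,
               PySem.List.pyGetD nums i 0 * PySem.List.pyGetD nums (i + 1) 0)
            else
              (PySem.List.pyGetD nums i 0 + q.1.1, PySem.List.pyGetD nums i 0 + q.1.2,
               PySem.List.pyGetD nums i 0 + PySem.List.pyGetD nums (i + 1) 0)
          let w := bInner nums ops (bBest nums ops f) ((n - 1) - (i + 1)).toNat (i + 1)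
            s.2.2 s.1 s.2.1 q.2
          ((max w.1.1 w.1.2.2, min w.1.2.1 w.1.2.2), w.2)
      (rm.1, PySem.Dict.insert rm.2 i rm.1)

def solution_alt (nums : List Int) (operations : List String) : Int × Int :=
  let n : Int := (nums.length : Int)
  if n = 0 then (0, 0)
  else if n = 1 then
    let v := PySem.List.pyGetD nums 0 0
    (v, v)
  else if n = 2 then
    let v := if PySem.List.pyGetD operations 0 "" = "*" then
        PySem.List.pyGetD nums 0 0 * PySem.List.pyGetD nums 1 0
      else
        PySem.List.pyGetD nums 0 0 + PySem.List.pyGetD nums 1 0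
    (v, v)
  else
    (bBest nums operations nums.length 0 PySem.Dict.empty).1

-- ===== PRECONDITION & SPEC =====
-- Pre_ excludes inputs with fewer than 3 numbers, where the Python A returns a scalar int
-- (not a pair of the declared return type), and operations lists shorter than n-1, where A
-- raises IndexError.
def Pre_solution (nums : List Int) (operations : List String) : Prop :=
  3 ≤ nums.length ∧ nums.length - 1 ≤ operations.length
instance (nums : List Int) (operations : List String) : Decidable (Pre_solution nums operations) := by
  unfold Pre_solution; infer_instance

def pvWitness_solution : List Int × List String := ([1, 2, 3], ["+", "*"])

def Spec_solution (nums : List Int) (operations : List String) (out : Int × Int) : Prop :=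
  out = solution_alt nums operations
instance (nums : List Int) (operations : List String) (out : Int × Int) : Decidable (Spec_solution nums operations out) := by
  unfold Spec_solution; infer_instance

-- ===== CLAIM (what is proved, stated in full; the proofs are below) =====
def Claim_equal_solution : Prop := ∀ (nums : List Int) (operations : List String), Dom_solution nums operations → Pre_solution nums operations → Spec_solution nums operations (solution nums operations)

-- ===== LEMMAS AND PROOFS =====

-- proof-only definitions ------------------------------------------------------

-- fold max/min over a nonempty list (0 on [])
def extl (mm : Int → Int → Int) : List Int → Int
  | [] => 0
  | c :: t => t.foldl mm c

-- the binary operation selected by an operator string (proof-side notation)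
def app (op : String) (x y : Int) : Int := if op = "*" then x * y else x + y

-- left-to-right evaluation of the group nums[i..i+k]
def ev (nums : List Int) (ops : List String) (i : ℕ) : ℕ → Int
  | 0 => nums.getD i 0
  | (k+1) => app (ops.getD (i+k) "") (ev nums ops i k) (nums.getD (i+k+1) 0)

-- candidate value for the split whose first group is nums[i..i+k]
def cand (nums : List Int) (ops : List String) (g : ℕ → Int) (i k : ℕ) : Int :=
  if i + k + 1 < nums.length then app (ops.getD (i+k) "") (ev nums ops i k) (g (i+k+1))
  else ev nums ops i k

-- reference list of (max,min) pairs for the last m indices, built back to front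
def FL (nums : List Int) (ops : List String) : ℕ → List (Int × Int)
  | 0 => []
  | 1 => [(nums.getD (nums.length - 1) 0, nums.getD (nums.length - 1) 0)]
  | 2 =>
    [(app (ops.getD (ops.length - 1) "") (nums.getD (nums.length - 2) 0) (nums.getD (nums.length - 1) 0),
      app (ops.getD (ops.length - 1) "") (nums.getD (nums.length - 2) 0) (nums.getD (nums.length - 1) 0)),
     (nums.getD (nums.length - 1) 0, nums.getD (nums.length - 1) 0)]
  | (d+3) =>
    let rest := FL nums ops (d+2)
    let i := nums.length - (d+3)
    (extl max ((List.range (d+3)).map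
        (cand nums ops (fun a => (rest.getD (a - i - 1) ((0:Int),(0:Int))).1) i)),
     extl min ((List.range (d+3)).map
        (cand nums ops (fun a => (rest.getD (a - i - 1) ((0:Int),(0:Int))).2) i))) :: rest

def G (nums : List Int) (ops : List String) (i : ℕ) : Int × Int :=
  (FL nums ops (nums.length - i)).getD 0 ((0:Int),(0:Int))

-- scalar form of A's inner loop: c = running extremum, t = running group value,
-- k = offset of the next split from i, r = remaining steps
def scal (nums : List Int) (ops : List String) (mm : Int → Int → Int) (g : ℕ → Int)
    (i : ℕ) : Int → Int → ℕ → ℕ → Int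
  | c, _, _, 0 => c
  | c, t, k, (r+1) =>
    let t' := app (ops.getD (i+k-1) "") t (nums.getD (i+k) 0)
    scal nums ops mm g i
      (mm c (if i+k+1 < nums.length then app (ops.getD (i+k) "") t' (g (i+k+1)) else t'))
      t' (k+1) r

-- generic form of A's inner loop body (aInnerMax = gInner max, aInnerMin = gInner min)
def gInner (nums : List Int) (operations : List String) (mm : Int → Int → Int) (i : Int) :
    List Int × Int → Int → List Int × Int := fun st j =>
  let temp := if PySem.List.pyGetD operations (j - 1) "" = "*" then
      st.2 * PySem.List.pyGetD nums j 0
    else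
      st.2 + PySem.List.pyGetD nums j 0
  let dp1 := if j + 1 < (nums.length : Int) then
      PySem.List.pySetD st.1 i (mm (PySem.List.pyGetD st.1 i 0)
        (if PySem.List.pyGetD operations j "" = "*" then
            temp * PySem.List.pyGetD st.1 (j + 1) 0
          else
            temp + PySem.List.pyGetD st.1 (j + 1) 0))
    else
      PySem.List.pySetD st.1 i (mm (PySem.List.pyGetD st.1 i 0) temp)
  (dp1, temp)

def gOuter (nums : List Int) (operations : List String) (mm : Int → Int → Int) :
    List Int → Int → List Int := fun dp1 i =>
  let dp1 := PySem.List.pySetD dp1 i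
    (if PySem.List.pyGetD operations i "" = "*" then
        PySem.List.pyGetD nums i 0 * PySem.List.pyGetD dp1 (i + 1) 0
      else
        PySem.List.pyGetD nums i 0 + PySem.List.pyGetD dp1 (i + 1) 0)
  let st := (PySem.List.pyRange (i + 1) (nums.length : Int) 1).foldl
    (gInner nums operations mm i) (dp1, PySem.List.pyGetD nums i 0)
  st.1

-- countdown recursion matching foldl over pyRange i (-1) (-1)
def down {α : Type} (f : α → ℕ → α) (d : α) : ℕ → α
  | 0 => f d 0
  | (i+1) => down f (f d (i+1)) i

-- invariant of A's outer loops
def InvA (nums : List Int) (ops : List String) (sel : Int × Int → Int)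
    (dp : List Int) (i : ℕ) : Prop :=
  dp.length = nums.length ∧
    ∀ k, i ≤ k → k < nums.length → dp.getD k 0 = sel (G nums ops k)

-- memo-dict invariant of B's recursion: every stored pair is the reference value
def GoodM (nums : List Int) (ops : List String) (memo : PySem.Dict Int (Int × Int)) : Prop :=
  ∀ (k : Int) (p : Int × Int), PySem.Dict.get? memo k = some p → 0 ≤ k ∧ p = G nums ops k.toNat

-- basic bridges -----------------------------------------------------------------

theorem aOuterMax_eq (nums : List Int) (ops : List String) :
    aOuterMax nums ops = gOuter nums ops max := rfl

theorem aOuterMin_eq (nums : List Int) (ops : List String) :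
    aOuterMin nums ops = gOuter nums ops min := rfl

theorem getD_set_ne (l : List Int) (i k : ℕ) (v : Int) (h : k ≠ i) :
    (l.set i v).getD k 0 = l.getD k 0 := by
  simp [List.getD, List.getElem?_set_ne (by omega : i ≠ k)]

theorem getD_set_self (l : List Int) (i : ℕ) (v : Int) (h : i < l.length) :
    (l.set i v).getD i 0 = v := by
  simp [List.getD, h]

theorem pySetD_neg_one (l : List Int) (v : Int) (h : 1 ≤ l.length) :
    PySem.List.pySetD l (-1) v = l.set (l.length - 1) v := by
  unfold PySem.List.pySetD PySem.List.pySet? PySem.List.pyIdx?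
  rw [if_neg (by omega), if_pos (by omega)]
  simp

theorem pySetD_neg_two (l : List Int) (v : Int) (h : 2 ≤ l.length) :
    PySem.List.pySetD l (-2) v = l.set (l.length - 2) v := by
  unfold PySem.List.pySetD PySem.List.pySet? PySem.List.pyIdx?
  rw [if_neg (by omega), if_pos (by omega)]
  simp

theorem pyGetD_neg_getD {α : Type} (l : List α) (k : ℕ) (d : α) (h0 : 0 < k) (h : k ≤ l.length) :
    PySem.List.pyGetD l (-(k:Int)) d = l.getD (l.length - k) d := by
  rw [PySem.List.pyGetD_neg_natCast l k d h0 h]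
  rw [List.getD_eq_getElem l d (by omega)]

theorem foldl_countdown {α : Type} (f : α → Int → α) :
    ∀ (i : ℕ) (d : α),
      (PySem.List.pyRange (i : Int) (-1) (-1)).foldl f d
        = down (fun a k => f a (k : Int)) d i := by
  intro i
  induction i with
  | zero =>
    intro d
    rw [PySem.List.pyRange_neg_one_cons (by omega)]
    rw [show ((0:ℕ):Int) - 1 = -1 by omega]
    rw [PySem.List.pyRange_neg_one_eq_nil (by omega)]
    simp [down]
  | succ i ih =>
    intro d
    rw [PySem.List.pyRange_neg_one_cons (by omega)]
    rw [show ((i+1:ℕ):Int) - 1 = (i:Int) by push_cast; omega]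
    simp only [List.foldl_cons]
    rw [ih]
    rfl

-- FL structure ------------------------------------------------------------------

theorem FL_three (nums : List Int) (ops : List String) (d : ℕ) :
    FL nums ops (d+3)
      = ((extl max ((List.range (d+3)).map
            (cand nums ops
              (fun a => ((FL nums ops (d+2)).getD (a - (nums.length - (d+3)) - 1) ((0:Int),(0:Int))).1)
              (nums.length - (d+3)))),
          extl min ((List.range (d+3)).map
            (cand nums ops
              (fun a => ((FL nums ops (d+2)).getD (a - (nums.length - (d+3)) - 1) ((0:Int),(0:Int))).2)
              (nums.length - (d+3))))) :: FL nums ops (d+2)) := by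
  rfl

theorem FL_getD (nums : List Int) (ops : List String) :
    ∀ (k m : ℕ), k < m →
      (FL nums ops m).getD k ((0:Int),(0:Int))
        = (FL nums ops (m-k)).getD 0 ((0:Int),(0:Int)) := by
  intro k
  induction k with
  | zero => intro m _; simp
  | succ k ih =>
    intro m hm
    match m, hm with
    | 0, hm => exact absurd hm (by omega)
    | 1, hm => exact absurd hm (by omega)
    | 2, hm =>
      have hk0 : k = 0 := by omega
      subst hk0
      rfl
    | (d+3), hm =>
      rw [FL_three]
      rw [List.getD_cons_succ]
      rw [ih (d+2) (by omega)]
      rw [show d+3-(k+1) = d+2-k from by omega]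

theorem scal_foldl (nums : List Int) (ops : List String) (mm : Int → Int → Int)
    (g : ℕ → Int) (i : ℕ) :
    ∀ (r k : ℕ) (c : Int), 1 ≤ k →
      scal nums ops mm g i c (ev nums ops i (k-1)) k r
        = List.foldl mm c ((List.range' k r).map (cand nums ops g i)) := by
  intro r
  induction r with
  | zero => intro k c _; simp [scal]
  | succ r ih =>
    intro k c hk
    rw [List.range'_succ, List.map_cons, List.foldl_cons]
    show scal nums ops mm g i _ _ _ _ = _
    rw [scal]
    have ht : app (ops.getD (i+k-1) "") (ev nums ops i (k-1)) (nums.getD (i+k) 0)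
        = ev nums ops i k := by
      have hk1 : k = (k-1)+1 := by omega
      rw [hk1, ev]
      congr 2
    rw [ht]
    have hc : (mm c (if i+k+1 < nums.length
            then app (ops.getD (i+k) "") (ev nums ops i k) (g (i+k+1))
            else ev nums ops i k))
        = mm c (cand nums ops g i k) := by
      rw [cand]
    rw [hc]
    have := ih (k+1) (mm c (cand nums ops g i k)) (by omega)
    rw [show k+1-1 = k by omega] at this
    exact this

theorem extl_range (mm : Int → Int → Int) (m : ℕ) (f : ℕ → Int) :
    extl mm ((List.range (m+1)).map f) = List.foldl mm (f 0) ((List.range' 1 m).map f) := by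
  rw [List.range_eq_range', List.range'_succ, List.map_cons]
  rfl

-- FL head characterisation --------------------------------------------------------

theorem FL_head (nums : List Int) (ops : List String) (i : ℕ)
    (h2 : i + 3 ≤ nums.length) :
    (FL nums ops (nums.length - i)).getD 0 ((0:Int),(0:Int))
      = (extl max ((List.range (nums.length - i)).map
            (cand nums ops (fun a => (G nums ops a).1) i)),
         extl min ((List.range (nums.length - i)).map
            (cand nums ops (fun a => (G nums ops a).2) i))) := by
  have hd : nums.length - i = (nums.length - i - 3) + 3 := by omega
  set d := nums.length - i - 3 with hdd
  rw [hd, FL_three]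
  have hi : nums.length - (d+3) = i := by omega
  rw [hi, List.getD_cons_zero]
  have hmap : ∀ (sel : Int × Int → Int),
      (List.range (d+3)).map
        (cand nums ops (fun a => sel ((FL nums ops (d+2)).getD (a - i - 1) ((0:Int),(0:Int)))) i)
      = (List.range (d+3)).map (cand nums ops (fun a => sel (G nums ops a)) i) := by
    intro sel
    apply List.map_congr_left
    intro k hk
    rw [List.mem_range] at hk
    unfold cand
    by_cases hlt : i + k + 1 < nums.length
    · rw [if_pos hlt, if_pos hlt]
      have hk1 : k < d + 2 := by omega
      congr 1
      show sel ((FL nums ops (d+2)).getD (i + k + 1 - i - 1) ((0:Int),(0:Int)))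
        = sel (G nums ops (i + k + 1))
      rw [show i + k + 1 - i - 1 = k from by omega]
      rw [FL_getD nums ops k (d+2) hk1]
      unfold G
      rw [show nums.length - (i + k + 1) = d + 2 - k from by omega]
    · rw [if_neg hlt, if_neg hlt]
  have h1 := hmap Prod.fst
  have h2' := hmap Prod.snd
  simp only at h1 h2'
  rw [h1, h2']

theorem G_fst (nums : List Int) (ops : List String) (i : ℕ) (h2 : i + 3 ≤ nums.length) :
    (G nums ops i).1 = extl max ((List.range (nums.length - i)).map
      (cand nums ops (fun a => (G nums ops a).1) i)) := by
  conv_lhs => rw [show G nums ops i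
    = (FL nums ops (nums.length - i)).getD 0 ((0:Int),(0:Int)) from rfl,
    FL_head nums ops i h2]

theorem G_snd (nums : List Int) (ops : List String) (i : ℕ) (h2 : i + 3 ≤ nums.length) :
    (G nums ops i).2 = extl min ((List.range (nums.length - i)).map
      (cand nums ops (fun a => (G nums ops a).2) i)) := by
  conv_lhs => rw [show G nums ops i
    = (FL nums ops (nums.length - i)).getD 0 ((0:Int),(0:Int)) from rfl,
    FL_head nums ops i h2]


-- A's inner loop computes scal -----------------------------------------------------

theorem innerA (nums : List Int) (ops : List String) (mm : Int → Int → Int)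
    (dp : List Int) (hlen : dp.length = nums.length) (i : ℕ) (hi : i < nums.length)
    (g : ℕ → Int) (hg : ∀ k, i < k → k < nums.length → dp.getD k 0 = g k) :
    ∀ (r a : ℕ), i < a → a + r = nums.length → ∀ (c t : Int),
      ((PySem.List.pyRange (a : Int) (nums.length : Int) 1).foldl
          (gInner nums ops mm (i : Int)) (dp.set i c, t)).1
        = dp.set i (scal nums ops mm g i c t (a - i) r) := by
  intro r
  induction r with
  | zero =>
    intro a hia ha c t
    rw [PySem.List.pyRange_one_eq_nil (by omega)]
    simp [scal]
  | succ r ih =>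
    intro a hia ha c t
    rw [PySem.List.pyRange_one_cons (by omega)]
    rw [List.foldl_cons]
    have hbody : gInner nums ops mm (i : Int) (dp.set i c, t) (a : Int)
        = (dp.set i (mm c (if a + 1 < nums.length
              then app (ops.getD a "") (app (ops.getD (a-1) "") t (nums.getD a 0)) (g (a+1))
              else app (ops.getD (a-1) "") t (nums.getD a 0))),
           app (ops.getD (a-1) "") t (nums.getD a 0)) := by
      unfold gInner
      have h1 : (a : Int) - 1 = ((a-1 : ℕ) : Int) := by omega
      have h2 : (a : Int) + 1 = ((a+1 : ℕ) : Int) := by omega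
      rw [h1, h2]
      simp only [PySem.List.pyGetD_natCast, PySem.List.pySetD_natCast]
      have htemp : (if ops.getD (a-1) "" = "*" then t * nums.getD a 0 else t + nums.getD a 0)
          = app (ops.getD (a-1) "") t (nums.getD a 0) := by rw [app]
      rw [htemp]
      have hrd : (dp.set i c).getD i 0 = c :=
        getD_set_self dp i c (by omega)
      rw [hrd]
      by_cases hn : a + 1 < nums.length
      · rw [if_pos (by exact_mod_cast hn), if_pos hn]
        rw [getD_set_ne dp i (a+1) c (by omega)]
        rw [hg (a+1) (by omega) hn]
        rw [List.set_set]
        have : (if ops.getD a "" = "*"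
              then app (ops.getD (a-1) "") t (nums.getD a 0) * g (a+1)
              else app (ops.getD (a-1) "") t (nums.getD a 0) + g (a+1))
            = app (ops.getD a "") (app (ops.getD (a-1) "") t (nums.getD a 0)) (g (a+1)) := by
          simp only [app]
        rw [this]
      · rw [if_neg (by exact_mod_cast hn), if_neg hn]
        rw [List.set_set]
    rw [hbody]
    have hscal : scal nums ops mm g i c t (a - i) (r+1)
        = scal nums ops mm g i (mm c (if a + 1 < nums.length
              then app (ops.getD a "") (app (ops.getD (a-1) "") t (nums.getD a 0)) (g (a+1))
              else app (ops.getD (a-1) "") t (nums.getD a 0)))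
            (app (ops.getD (a-1) "") t (nums.getD a 0)) ((a-i)+1) r := by
      rw [scal]
      have e1 : i + (a-i) - 1 = a - 1 := by omega
      have e2 : i + (a-i) = a := by omega
      rw [e1, e2]
    rw [hscal]
    have := ih (a+1) (by omega) (by omega)
      (mm c (if a + 1 < nums.length
          then app (ops.getD a "") (app (ops.getD (a-1) "") t (nums.getD a 0)) (g (a+1))
          else app (ops.getD (a-1) "") t (nums.getD a 0)))
      (app (ops.getD (a-1) "") t (nums.getD a 0))
    rw [show (a+1 : ℕ) - i = (a-i)+1 from by omega] at this
    rw [show ((a+1:ℕ) : Int) = (a : Int) + 1 from by omega] at this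
    exact this

-- A's outer step establishes the invariant one index further down ---------------------

theorem stepA (nums : List Int) (ops : List String) (mm : Int → Int → Int)
    (sel : Int × Int → Int)
    (hFL : ∀ j, j + 3 ≤ nums.length →
      sel (G nums ops j) = extl mm ((List.range (nums.length - j)).map
        (cand nums ops (fun a => sel (G nums ops a)) j)))
    (dp : List Int) (i : ℕ) (h3 : i + 3 ≤ nums.length)
    (hInv : InvA nums ops sel dp (i+1)) :
    gOuter nums ops mm dp (i : Int) = dp.set i (sel (G nums ops i))
      ∧ InvA nums ops sel (gOuter nums ops mm dp (i : Int)) i := by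
  obtain ⟨hlen, hval⟩ := hInv
  have hmain : gOuter nums ops mm dp (i : Int) = dp.set i (sel (G nums ops i)) := by
    unfold gOuter
    have h2 : (i : Int) + 1 = ((i+1 : ℕ) : Int) := by omega
    rw [h2]
    simp only [PySem.List.pyGetD_natCast, PySem.List.pySetD_natCast]
    have hc0 : (if ops.getD i "" = "*"
          then nums.getD i 0 * dp.getD (i+1) 0
          else nums.getD i 0 + dp.getD (i+1) 0)
        = cand nums ops (fun a => sel (G nums ops a)) i 0 := by
      rw [hval (i+1) (by omega) (by omega)]
      rw [cand, if_pos (by omega : i + 0 + 1 < nums.length)]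
      rw [app]
      simp [ev]
    rw [hc0]
    rw [innerA nums ops mm dp hlen i (by omega) (fun a => sel (G nums ops a))
      (fun k hk1 hk2 => hval k (by omega) hk2) (nums.length - (i+1)) (i+1) (by omega)
      (by omega) (cand nums ops (fun a => sel (G nums ops a)) i 0)
      (nums.getD i 0)]
    congr 1
    rw [show (i+1 : ℕ) - i = 1 from by omega]
    have hsc := scal_foldl nums ops mm (fun a => sel (G nums ops a)) i
      (nums.length - (i+1)) 1 (cand nums ops (fun a => sel (G nums ops a)) i 0) (by omega)
    rw [show (1:ℕ) - 1 = 0 from rfl] at hsc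
    rw [show ev nums ops i 0 = nums.getD i 0 from rfl] at hsc
    rw [hsc]
    rw [hFL i (by omega)]
    have hre := extl_range mm (nums.length - (i+1))
      (cand nums ops (fun a => sel (G nums ops a)) i)
    rw [show nums.length - (i+1) + 1 = nums.length - i from by omega] at hre
    rw [hre]
  refine ⟨hmain, ?_⟩
  rw [hmain]
  constructor
  · rw [List.length_set]; exact hlen
  · intro k hk1 hk2
    by_cases hk : k = i
    · subst hk
      exact getD_set_self dp k _ (by omega)
    · rw [getD_set_ne dp i k _ (by omega)]
      exact hval k (by omega) hk2

theorem downA (nums : List Int) (ops : List String) (mm : Int → Int → Int)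
    (sel : Int × Int → Int)
    (hFL : ∀ j, j + 3 ≤ nums.length →
      sel (G nums ops j) = extl mm ((List.range (nums.length - j)).map
        (cand nums ops (fun a => sel (G nums ops a)) j))) :
    ∀ (i : ℕ) (dp : List Int), i + 3 ≤ nums.length → InvA nums ops sel dp (i+1) →
      InvA nums ops sel (down (fun a k => gOuter nums ops mm a (k : Int)) dp i) 0 := by
  intro i
  induction i with
  | zero =>
    intro dp h3 hInv
    exact (stepA nums ops mm sel hFL dp 0 h3 hInv).2
  | succ i ih =>
    intro dp h3 hInv
    show InvA nums ops sel
      (down (fun a k => gOuter nums ops mm a (k : Int)) (gOuter nums ops mm dp ((i+1 : ℕ) : Int)) i) 0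
    exact ih (gOuter nums ops mm dp ((i+1 : ℕ) : Int)) (by omega)
      (stepA nums ops mm sel hFL dp (i+1) (by omega) hInv).2

-- values of G at the last two indices ------------------------------------------------

theorem G_last (nums : List Int) (ops : List String) (hn : 1 ≤ nums.length) :
    G nums ops (nums.length - 1) = (nums.getD (nums.length - 1) 0, nums.getD (nums.length - 1) 0) := by
  unfold G
  rw [show nums.length - (nums.length - 1) = 1 from by omega]
  rfl

theorem G_pen (nums : List Int) (ops : List String) (hn : 2 ≤ nums.length) :
    G nums ops (nums.length - 2)
      = (app (ops.getD (ops.length - 1) "") (nums.getD (nums.length - 2) 0) (nums.getD (nums.length - 1) 0),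
         app (ops.getD (ops.length - 1) "") (nums.getD (nums.length - 2) 0) (nums.getD (nums.length - 1) 0)) := by
  unfold G
  rw [show nums.length - (nums.length - 2) = 2 from by omega]
  rfl

-- the invariant holds for A's initial dp array ---------------------------------------

theorem init_Inv (nums : List Int) (ops : List String) (sel : Int × Int → Int)
    (hsel : ∀ y : Int, sel (y, y) = y)
    (hn : 3 ≤ nums.length) (hops : nums.length - 1 ≤ ops.length) :
    InvA nums ops sel
      (PySem.List.pySetD
        (PySem.List.pySetD (List.replicate nums.length (0:Int)) (-1) (PySem.List.pyGetD nums (-1) 0))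
        (-2)
        (if PySem.List.pyGetD ops (-1) "" = "*" then
            PySem.List.pyGetD nums (-2) 0 * PySem.List.pyGetD nums (-1) 0
          else
            PySem.List.pyGetD nums (-2) 0 + PySem.List.pyGetD nums (-1) 0))
      (nums.length - 2) := by
  have hops1 : 1 ≤ ops.length := by omega
  have hseedval : (if PySem.List.pyGetD ops (-1) "" = "*" then
        PySem.List.pyGetD nums (-2) 0 * PySem.List.pyGetD nums (-1) 0
      else
        PySem.List.pyGetD nums (-2) 0 + PySem.List.pyGetD nums (-1) 0)
      = app (ops.getD (ops.length - 1) "") (nums.getD (nums.length - 2) 0) (nums.getD (nums.length - 1) 0) := by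
    rw [show (-1 : Int) = -((1:ℕ):Int) from by omega, show (-2 : Int) = -((2:ℕ):Int) from by omega]
    rw [pyGetD_neg_getD nums 1 0 (by omega) (by omega)]
    rw [pyGetD_neg_getD nums 2 0 (by omega) (by omega)]
    rw [pyGetD_neg_getD ops 1 "" (by omega) (by omega)]
    rw [app]
  rw [hseedval]
  rw [pySetD_neg_one _ _ (by simp; omega)]
  rw [pySetD_neg_two _ _ (by simp; omega)]
  rw [show (-1 : Int) = -((1:ℕ):Int) from by omega]
  rw [pyGetD_neg_getD nums 1 0 (by omega) (by omega)]
  simp only [List.length_replicate, List.length_set]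
  constructor
  · simp
  · intro k hk1 hk2
    have hkk : k = nums.length - 2 ∨ k = nums.length - 1 := by omega
    rcases hkk with hk | hk
    · subst hk
      rw [getD_set_self _ _ _ (by simp; omega)]
      rw [G_pen nums ops (by omega), hsel]
    · subst hk
      rw [getD_set_ne _ _ _ _ (by omega)]
      rw [getD_set_self _ _ _ (by simp; omega)]
      rw [G_last nums ops (by omega), hsel]

-- B-side: memo invariant facts ---------------------------------------------------------

theorem GoodM_empty (nums : List Int) (ops : List String) :
    GoodM nums ops PySem.Dict.empty := by
  intro k p h
  rw [PySem.Dict.get?_empty] at h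
  exact absurd h (by simp)

theorem GoodM_insert (nums : List Int) (ops : List String)
    (memo : PySem.Dict Int (Int × Int)) (h : GoodM nums ops memo) (i : ℕ) (v : Int × Int)
    (hv : v = G nums ops i) :
    GoodM nums ops (PySem.Dict.insert memo (i : Int) v) := by
  intro k p hk
  rw [PySem.Dict.get?_insert] at hk
  by_cases hki : k = (i : Int)
  · rw [if_pos hki] at hk
    refine ⟨by omega, ?_⟩
    cases hk
    rw [hv, hki]
    simp
  · rw [if_neg hki] at hk
    exact h k p hk

-- B's inner loop computes the candidate folds -------------------------------------------

theorem innerB (nums : List Int) (ops : List String) (f : ℕ)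
    (hb : ∀ (i : ℕ) (memo : PySem.Dict Int (Int × Int)), GoodM nums ops memo →
      i < nums.length → nums.length - i ≤ f →
      (bBest nums ops f (i : Int) memo).1 = G nums ops i
        ∧ GoodM nums ops (bBest nums ops f (i : Int) memo).2)
    (i : ℕ) :
    ∀ (r a : ℕ) (hi lo : Int) (memo : PySem.Dict Int (Int × Int)), GoodM nums ops memo →
      i < a → a + r = nums.length - 1 → 1 ≤ nums.length → nums.length - a - 1 ≤ f →
      (bInner nums ops (bBest nums ops f) r (a : Int) (ev nums ops i (a - i)) hi lo memo).1
          = (List.foldl max hi ((List.range' (a - i) r).map (cand nums ops (fun x => (G nums ops x).1) i)),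
             List.foldl min lo ((List.range' (a - i) r).map (cand nums ops (fun x => (G nums ops x).2) i)),
             ev nums ops i (a - i + r))
        ∧ GoodM nums ops
            (bInner nums ops (bBest nums ops f) r (a : Int) (ev nums ops i (a - i)) hi lo memo).2 := by
  intro r
  induction r with
  | zero =>
    intro a hi lo memo hg hia ha h1 hf
    refine ⟨by simp [bInner], ?_⟩
    simpa [bInner] using hg
  | succ r ih =>
    intro a hi lo memo hg hia ha h1 hf
    have hq := hb (a+1) memo hg (by omega) (by omega)
    simp only [bInner]
    rw [show ((a:ℕ) : Int) + 1 = ((a+1 : ℕ) : Int) from by omega]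
    simp only [PySem.List.pyGetD_natCast]
    set B := bBest nums ops f ((a+1 : ℕ) : Int) memo with hBdef
    have hrange : List.range' (a - i) (r+1) = (a - i) :: List.range' ((a+1) - i) r := by
      rw [List.range'_succ, show (a - i) + 1 = (a+1) - i from by omega]
    rw [hrange, List.map_cons, List.map_cons, List.foldl_cons, List.foldl_cons]
    rw [show a - i + (r+1) = (a+1) - i + r from by omega]
    have hcf : cand nums ops (fun x => (G nums ops x).1) i (a - i)
        = app (ops.getD a "") (ev nums ops i (a - i)) B.1.1 := by
      simp only [cand]
      rw [if_pos (by omega : i + (a - i) + 1 < nums.length)]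
      rw [show i + (a - i) = a from by omega]
      rw [hq.1]
    have hcs : cand nums ops (fun x => (G nums ops x).2) i (a - i)
        = app (ops.getD a "") (ev nums ops i (a - i)) B.1.2 := by
      simp only [cand]
      rw [if_pos (by omega : i + (a - i) + 1 < nums.length)]
      rw [show i + (a - i) = a from by omega]
      rw [hq.1]
    have htm : ev nums ops i ((a+1) - i)
        = app (ops.getD a "") (ev nums ops i (a - i)) (nums.getD (a+1) 0) := by
      rw [show (a+1) - i = (a - i) + 1 from by omega, ev]
      rw [show i + (a - i) = a from by omega]
    by_cases hop : ops.getD a "" = "*"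
    · rw [if_pos hop]
      have e1 : ev nums ops i (a - i) * nums.getD (a+1) 0 = ev nums ops i ((a+1) - i) := by
        rw [htm, app, if_pos hop]
      have e2 : max hi (ev nums ops i (a - i) * B.1.1)
          = max hi (cand nums ops (fun x => (G nums ops x).1) i (a - i)) := by
        rw [hcf, app, if_pos hop]
      have e3 : min lo (ev nums ops i (a - i) * B.1.2)
          = min lo (cand nums ops (fun x => (G nums ops x).2) i (a - i)) := by
        rw [hcs, app, if_pos hop]
      rw [e1, e2, e3]
      exact ih (a+1) _ _ B.2 hq.2 (by omega) (by omega) h1 (by omega)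
    · rw [if_neg hop]
      have e1 : ev nums ops i (a - i) + nums.getD (a+1) 0 = ev nums ops i ((a+1) - i) := by
        rw [htm, app, if_neg hop]
      have e2 : max hi (ev nums ops i (a - i) + B.1.1)
          = max hi (cand nums ops (fun x => (G nums ops x).1) i (a - i)) := by
        rw [hcf, app, if_neg hop]
      have e3 : min lo (ev nums ops i (a - i) + B.1.2)
          = min lo (cand nums ops (fun x => (G nums ops x).2) i (a - i)) := by
        rw [hcs, app, if_neg hop]
      rw [e1, e2, e3]
      exact ih (a+1) _ _ B.2 hq.2 (by omega) (by omega) h1 (by omega)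

theorem bestB_correct (nums : List Int) (ops : List String)
    (h3 : 3 ≤ nums.length) (hops : nums.length - 1 ≤ ops.length) :
    ∀ (f : ℕ) (i : ℕ) (memo : PySem.Dict Int (Int × Int)), GoodM nums ops memo →
      i < nums.length → nums.length - i ≤ f →
      (bBest nums ops f (i : Int) memo).1 = G nums ops i
        ∧ GoodM nums ops (bBest nums ops f (i : Int) memo).2 := by
  intro f
  induction f with
  | zero => intro i memo hg hi hf; omega
  | succ f ihf =>
    intro i memo hg hi hf
    simp only [bBest]
    by_cases hc : PySem.Dict.contains memo ((i:ℕ) : Int)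
    · rw [if_pos hc]
      have hs : (PySem.Dict.get? memo ((i:ℕ):Int)).isSome = true := by
        rw [← PySem.Dict.contains_eq_isSome_get?]; exact hc
      obtain ⟨p, hp⟩ := Option.isSome_iff_exists.mp hs
      have hgp := hg _ _ hp
      refine ⟨?_, hg⟩
      show PySem.Dict.getD memo ((i:ℕ):Int) ((0:Int),(0:Int)) = G nums ops i
      rw [PySem.Dict.getD_eq_get?_getD, hp, Option.getD_some, hgp.2]
      norm_num
    · rw [if_neg hc]
      by_cases h1 : i = nums.length - 1
      · rw [if_pos (show ((i:ℕ):Int) = (nums.length:Int) - 1 from by omega)]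
        have hpair : (PySem.List.pyGetD nums ((i:ℕ):Int) 0, PySem.List.pyGetD nums ((i:ℕ):Int) 0)
            = G nums ops i := by
          rw [PySem.List.pyGetD_natCast, h1, G_last nums ops (by omega)]
        exact ⟨hpair, GoodM_insert nums ops memo hg i _ hpair⟩
      · by_cases h2 : i = nums.length - 2
        · rw [if_neg (show ¬ ((i:ℕ):Int) = (nums.length:Int) - 1 from by omega)]
          rw [if_pos (show ((i:ℕ):Int) = (nums.length:Int) - 2 from by omega)]
          rw [show ((i:ℕ):Int) + 1 = ((i+1:ℕ):Int) from by omega]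
          rw [show (-1:Int) = -((1:ℕ):Int) from by norm_num]
          rw [pyGetD_neg_getD ops 1 "" (by omega) (by omega)]
          simp only [PySem.List.pyGetD_natCast]
          have hv : (if ops.getD (ops.length - 1) "" = "*" then
                nums.getD i 0 * nums.getD (i+1) 0
              else nums.getD i 0 + nums.getD (i+1) 0)
              = app (ops.getD (ops.length - 1) "") (nums.getD i 0) (nums.getD (i+1) 0) := by
            rw [app]
          rw [hv]
          have hG : (app (ops.getD (ops.length - 1) "") (nums.getD i 0) (nums.getD (i+1) 0),
                app (ops.getD (ops.length - 1) "") (nums.getD i 0) (nums.getD (i+1) 0))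
              = G nums ops i := by
            rw [show i + 1 = nums.length - 1 from by omega]
            rw [h2, G_pen nums ops (by omega)]
          exact ⟨hG, GoodM_insert nums ops memo hg i _ hG⟩
        · rw [if_neg (show ¬ ((i:ℕ):Int) = (nums.length:Int) - 1 from by omega)]
          rw [if_neg (show ¬ ((i:ℕ):Int) = (nums.length:Int) - 2 from by omega)]
          rw [show ((i:ℕ):Int) + 1 = ((i+1:ℕ):Int) from by omega]
          simp only [PySem.List.pyGetD_natCast]
          obtain ⟨m, hm⟩ : ∃ m, nums.length = i + (m + 3) := ⟨nums.length - i - 3, by omega⟩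
          have hq := ihf (i+1) memo hg (by omega) (by omega)
          set B := bBest nums ops f ((i+1 : ℕ) : Int) memo with hBdef
          rw [show ((nums.length:Int) - 1 - ((i+1:ℕ):Int)).toNat = m + 1 from by
            push_cast; omega]
          have hlt : i + 0 + 1 < nums.length := by omega
          have hGpair1 : (max (List.foldl max
              (cand nums ops (fun x => (G nums ops x).1) i 0)
              ((List.range' 1 (m+1)).map (cand nums ops (fun x => (G nums ops x).1) i)))
              (ev nums ops i (m+2)),
            min (List.foldl min
              (cand nums ops (fun x => (G nums ops x).2) i 0)
              ((List.range' 1 (m+1)).map (cand nums ops (fun x => (G nums ops x).2) i)))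
              (ev nums ops i (m+2)))
            = G nums ops i := by
            rw [Prod.ext_iff]
            refine ⟨?_, ?_⟩
            · show _ = (G nums ops i).1
              rw [G_fst nums ops i (by omega)]
              rw [show nums.length - i = (m+2) + 1 from by omega]
              rw [extl_range]
              rw [show List.range' 1 (m+2) = List.range' 1 (m+1) ++ [m+2] from by
                rw [show (m+2 : ℕ) = (m+1) + 1 from rfl, List.range'_concat,
                  show 1 + 1 * (m+1) = (m+1) + 1 from by omega]]
              rw [List.map_append, List.foldl_append]
              simp only [List.map_cons, List.map_nil, List.foldl_cons, List.foldl_nil]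
              rw [show cand nums ops (fun x => (G nums ops x).1) i (m+2)
                  = ev nums ops i (m+2) from by
                simp only [cand]; rw [if_neg (by omega)]]
            · show _ = (G nums ops i).2
              rw [G_snd nums ops i (by omega)]
              rw [show nums.length - i = (m+2) + 1 from by omega]
              rw [extl_range]
              rw [show List.range' 1 (m+2) = List.range' 1 (m+1) ++ [m+2] from by
                rw [show (m+2 : ℕ) = (m+1) + 1 from rfl, List.range'_concat,
                  show 1 + 1 * (m+1) = (m+1) + 1 from by omega]]
              rw [List.map_append, List.foldl_append]
              simp only [List.map_cons, List.map_nil, List.foldl_cons, List.foldl_nil]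
              rw [show cand nums ops (fun x => (G nums ops x).2) i (m+2)
                  = ev nums ops i (m+2) from by
                simp only [cand]; rw [if_neg (by omega)]]
          by_cases hop : ops.getD i "" = "*"
          · rw [if_pos hop]
            have e1 : nums.getD i 0 * nums.getD (i+1) 0 = ev nums ops i 1 := by
              show _ = ev nums ops i (0+1)
              simp only [ev, Nat.add_zero, app]
              rw [if_pos hop]
            have e2 : nums.getD i 0 * B.1.1
                = cand nums ops (fun x => (G nums ops x).1) i 0 := by
              simp only [cand, Nat.add_zero, ev]
              rw [if_pos (show i + 1 < nums.length from by omega), app, if_pos hop, hq.1]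
            have e3 : nums.getD i 0 * B.1.2
                = cand nums ops (fun x => (G nums ops x).2) i 0 := by
              simp only [cand, Nat.add_zero, ev]
              rw [if_pos (show i + 1 < nums.length from by omega), app, if_pos hop, hq.1]
            dsimp only
            rw [e1, e2, e3]
            have H := innerB nums ops f ihf i (m+1) (i+1)
              (cand nums ops (fun x => (G nums ops x).1) i 0)
              (cand nums ops (fun x => (G nums ops x).2) i 0)
              B.2 hq.2 (by omega) (by omega) (by omega) (by omega)
            rw [show (i+1) - i = 1 from by omega] at H
            rw [show (1 : ℕ) + (m+1) = m+2 from by omega] at H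
            set w := bInner nums ops (bBest nums ops f) (m+1) ((i+1 : ℕ) : Int)
              (ev nums ops i 1)
              (cand nums ops (fun x => (G nums ops x).1) i 0)
              (cand nums ops (fun x => (G nums ops x).2) i 0) B.2 with hwdef
            have hw1 : (max w.1.1 w.1.2.2, min w.1.2.1 w.1.2.2) = G nums ops i := by
              rw [H.1]
              exact hGpair1
            exact ⟨hw1, GoodM_insert nums ops w.2 H.2 i _ hw1⟩
          · rw [if_neg hop]
            have e1 : nums.getD i 0 + nums.getD (i+1) 0 = ev nums ops i 1 := by
              show _ = ev nums ops i (0+1)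
              simp only [ev, Nat.add_zero, app]
              rw [if_neg hop]
            have e2 : nums.getD i 0 + B.1.1
                = cand nums ops (fun x => (G nums ops x).1) i 0 := by
              simp only [cand, Nat.add_zero, ev]
              rw [if_pos (show i + 1 < nums.length from by omega), app, if_neg hop, hq.1]
            have e3 : nums.getD i 0 + B.1.2
                = cand nums ops (fun x => (G nums ops x).2) i 0 := by
              simp only [cand, Nat.add_zero, ev]
              rw [if_pos (show i + 1 < nums.length from by omega), app, if_neg hop, hq.1]
            dsimp only
            rw [e1, e2, e3]
            have H := innerB nums ops f ihf i (m+1) (i+1)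
              (cand nums ops (fun x => (G nums ops x).1) i 0)
              (cand nums ops (fun x => (G nums ops x).2) i 0)
              B.2 hq.2 (by omega) (by omega) (by omega) (by omega)
            rw [show (i+1) - i = 1 from by omega] at H
            rw [show (1 : ℕ) + (m+1) = m+2 from by omega] at H
            set w := bInner nums ops (bBest nums ops f) (m+1) ((i+1 : ℕ) : Int)
              (ev nums ops i 1)
              (cand nums ops (fun x => (G nums ops x).1) i 0)
              (cand nums ops (fun x => (G nums ops x).2) i 0) B.2 with hwdef
            have hw1 : (max w.1.1 w.1.2.2, min w.1.2.1 w.1.2.2) = G nums ops i := by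
              rw [H.1]
              exact hGpair1
            exact ⟨hw1, GoodM_insert nums ops w.2 H.2 i _ hw1⟩

-- ===== VERDICT (by name: the statement is the Claim_ definition above) =====
theorem solution_spec : Claim_equal_solution := by
  intro nums ops hdom hpre
  obtain ⟨hn3, hops⟩ := hpre
  show solution nums ops = solution_alt nums ops
  unfold solution solution_alt
  dsimp only
  rw [if_neg (by omega : ¬ ((nums.length : Int) = 0))]
  rw [if_neg (by omega : ¬ ((nums.length : Int) = 1))]
  rw [if_neg (by omega : ¬ ((nums.length : Int) = 2))]
  rw [if_neg (by omega : ¬ ((nums.length : Int) = 0))]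
  rw [if_neg (by omega : ¬ ((nums.length : Int) = 1))]
  rw [if_neg (by omega : ¬ ((nums.length : Int) = 2))]
  rw [aOuterMax_eq, aOuterMin_eq]
  rw [show (nums.length : Int) - 3 = ((nums.length - 3 : ℕ) : Int) from by omega]
  rw [foldl_countdown (gOuter nums ops max) (nums.length - 3)]
  rw [foldl_countdown (gOuter nums ops min) (nums.length - 3)]
  -- A side
  have hinit1 := init_Inv nums ops Prod.fst (fun y => rfl) hn3 hops
  have hinit2 := init_Inv nums ops Prod.snd (fun y => rfl) hn3 hops
  rw [show nums.length - 2 = (nums.length - 3) + 1 from by omega] at hinit1 hinit2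
  have hIA1 := downA nums ops max Prod.fst (fun j hj => G_fst nums ops j hj)
    (nums.length - 3) _ (by omega) hinit1
  have hIA2 := downA nums ops min Prod.snd (fun j hj => G_snd nums ops j hj)
    (nums.length - 3) _ (by omega) hinit2
  rw [PySem.List.pyGetD_zero, PySem.List.pyGetD_zero]
  rw [hIA1.2 0 (by omega) (by omega), hIA2.2 0 (by omega) (by omega)]
  -- B side
  have hB := (bestB_correct nums ops hn3 hops nums.length 0 PySem.Dict.empty
    (GoodM_empty nums ops) (by omega) (by omega)).1
  rw [show ((0:ℕ) : Int) = (0 : Int) from rfl] at hB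
  rw [hB]
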